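-- pv_equiv track=rewrite | github.com/cksl0830/Algorithm-Study | 카카오기출/Level2/방금그곡.py | solution
-- ===== SOURCE A (Python) =====
-- def solution(m, musicinfos):
--
--     answer = []
--
--     for temp in musicinfos:
--         info = temp.split(',')
--         start = info[0].split(':')
--         end = info[1].split(':')
--
--         time = (int(end[0]) - int(start[0])) * 60 + int(end[1]) - int(start[1])
--
--         code = change(info[3])
--         code = code * (time // len(code)) + code[:time % len(code)]
--
--         if change(m) in code:
--             answer.append((info[2], time))
--
--     if len(answer) == 0:
--         return "(None)"
--
--     else:
--         answer.sort(key = lambda x: -x[1])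
--         return answer[0][0]
--
-- def change(code):
--     code = code.replace('C#', 'c')
--     code = code.replace('D#', 'd')
--     code = code.replace('F#', 'f')
--     code = code.replace('G#', 'g')
--     code = code.replace('A#', 'a')
--     return code
-- ===== SOURCE B (Python) =====
-- def change(code):
--     res = []
--     for ch in code:
--         if ch == '#' and res and res[-1] in 'CDFGA':
--             res[-1] = res[-1].lower()
--         else:
--             res.append(ch)
--     return ''.join(res)
--
-- def to_min(ts):
--     p = ts.split(':')
--     return int(p[0]) * 60 + int(p[1])
--
-- def solution(m, musicinfos):
--     target = change(m)
--     best = None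
--     for info in musicinfos:
--         f = info.split(',')
--         time = to_min(f[1]) - to_min(f[0])
--         mel = change(f[3])
--         played = mel * (time // len(mel)) + mel[:time % len(mel)]
--         if target in played and (best is None or time > best[1]):
--             best = (f[2], time)
--     return "(None)" if best is None else best[0]
-- ===== Notes on version B (the rewrite author's own statement) =====
-- stated objective: alternative
-- what changed: B rewrites the sharp-note translation as a single left-to-right character scan instead of five sequential str.replace passes, and replaces A's collect-all-matches / stable-sort-descending / take-first selection by a single-pass running strict maximum kept in an Optional best pair.
import Mathlib
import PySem

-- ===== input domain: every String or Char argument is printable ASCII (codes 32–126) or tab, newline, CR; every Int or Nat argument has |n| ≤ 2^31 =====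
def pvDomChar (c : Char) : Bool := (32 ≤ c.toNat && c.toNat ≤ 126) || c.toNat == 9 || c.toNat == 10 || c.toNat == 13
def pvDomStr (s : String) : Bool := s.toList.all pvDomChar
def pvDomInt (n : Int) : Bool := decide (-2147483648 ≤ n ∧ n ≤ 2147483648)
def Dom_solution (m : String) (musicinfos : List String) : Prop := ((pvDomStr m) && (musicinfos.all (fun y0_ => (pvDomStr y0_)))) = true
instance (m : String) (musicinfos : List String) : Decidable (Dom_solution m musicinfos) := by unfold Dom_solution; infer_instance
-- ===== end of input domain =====

-- B replaces A's five sequential str.replace passes by a single left-to-right scan and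
-- A's collect-all-then-sort selection by a running strict maximum (alternative decomposition).
-- Hand port of Python's  s * n  on strings (exact: Python returns "" for n ≤ 0).
def pyStrMul (s : String) (n : Int) : String := String.ofList ((List.replicate n.toNat s.toList).flatten)

-- ===== PORT A =====
def change (code : String) : String :=
  PySem.Str.replace (PySem.Str.replace (PySem.Str.replace (PySem.Str.replace
    (PySem.Str.replace code "C#" "c") "D#" "d") "F#" "f") "G#" "g") "A#" "a"

def solution (m : String) (musicinfos : List String) : String :=
  let answer := musicinfos.foldl (fun answer temp =>
    let info := (PySem.Str.split? temp ",").getD []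
    let start := (PySem.Str.split? ((PySem.List.pyGet? info 0).getD "") ":").getD []
    let stop := (PySem.Str.split? ((PySem.List.pyGet? info 1).getD "") ":").getD []
    let time := ((PySem.Int.ofStr? ((PySem.List.pyGet? stop 0).getD "")).getD 0
                  - (PySem.Int.ofStr? ((PySem.List.pyGet? start 0).getD "")).getD 0) * 60
                + (PySem.Int.ofStr? ((PySem.List.pyGet? stop 1).getD "")).getD 0
                - (PySem.Int.ofStr? ((PySem.List.pyGet? start 1).getD "")).getD 0
    let code0 := change ((PySem.List.pyGet? info 3).getD "")
    let code := pyStrMul code0 (PySem.Int.floordiv time (PySem.Str.len code0))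
                 ++ PySem.Str.slice code0 none (some (PySem.Int.mod time (PySem.Str.len code0)))
    if PySem.Str.isIn (change m) code then answer ++ [(((PySem.List.pyGet? info 2).getD ""), time)]
    else answer) ([] : List (String × Int))
  if answer.length == 0 then "(None)"
  else ((PySem.List.pyGet? (PySem.List.sorted answer (fun x => -x.2)) 0).map Prod.fst).getD ""

-- ===== PORT B =====
def trig : List Char := ['C', 'D', 'F', 'G', 'A']

def change_alt (code : String) : String :=
  String.ofList ((code.toList.foldl (fun res ch =>
    if ch = '#' then
      match res with
      | p :: t => if p ∈ trig then PySem.Chars.lowerChar p :: t else '#' :: res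
      | [] => '#' :: res
    else ch :: res) []).reverse)

def toMin (ts : String) : Int :=
  let p := (PySem.Str.split? ts ":").getD []
  (PySem.Int.ofStr? ((PySem.List.pyGet? p 0).getD "")).getD 0 * 60
    + (PySem.Int.ofStr? ((PySem.List.pyGet? p 1).getD "")).getD 0

def solution_alt (m : String) (musicinfos : List String) : String :=
  let target := change_alt m
  let best := musicinfos.foldl (fun best info =>
    let f := (PySem.Str.split? info ",").getD []
    let time := toMin ((PySem.List.pyGet? f 1).getD "") - toMin ((PySem.List.pyGet? f 0).getD "")
    let mel := change_alt ((PySem.List.pyGet? f 3).getD "")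
    let played := pyStrMul mel (PySem.Int.floordiv time (PySem.Str.len mel))
                   ++ PySem.Str.slice mel none (some (PySem.Int.mod time (PySem.Str.len mel)))
    if PySem.Str.isIn target played &&
        (match best with | none => true | some q => decide (q.2 < time)) then
      some (((PySem.List.pyGet? f 2).getD ""), time)
    else best) (none : Option (String × Int))
  match best with
  | none => "(None)"
  | some p => p.1

-- per-entry values, as computed by A
-- ===== PRECONDITION & SPEC =====
-- Pre_ excludes exactly the inputs on which Python A raises: an entry with fewer than 4
-- comma fields (IndexError), a start/end field without two ':'-separated int-parsable
-- parts (IndexError/ValueError), or an empty melody field (ZeroDivisionError in time // len(code)).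
def Pre_solution (m : String) (musicinfos : List String) : Prop :=
  ∀ temp ∈ musicinfos,
    let info := (PySem.Str.split? temp ",").getD []
    let start := (PySem.Str.split? ((PySem.List.pyGet? info 0).getD "") ":").getD []
    let stop := (PySem.Str.split? ((PySem.List.pyGet? info 1).getD "") ":").getD []
    4 ≤ info.length
      ∧ 2 ≤ start.length ∧ (PySem.Int.ofStr? ((PySem.List.pyGet? start 0).getD "")).isSome
      ∧ (PySem.Int.ofStr? ((PySem.List.pyGet? start 1).getD "")).isSome
      ∧ 2 ≤ stop.length ∧ (PySem.Int.ofStr? ((PySem.List.pyGet? stop 0).getD "")).isSome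
      ∧ (PySem.Int.ofStr? ((PySem.List.pyGet? stop 1).getD "")).isSome
      ∧ (PySem.List.pyGet? info 3).getD "" ≠ ""

instance (m : String) (musicinfos : List String) : Decidable (Pre_solution m musicinfos) := by
  unfold Pre_solution; infer_instance

def pvWitness_solution : String × List String :=
  ("CC#", ["03:00,03:30,WORLD,CC#DD", "04:00,04:08,HELLO,C#CC#"])

def Spec_solution (m : String) (musicinfos : List String) (out : String) : Prop := out = solution_alt m musicinfos
instance (m : String) (musicinfos : List String) (out : String) : Decidable (Spec_solution m musicinfos out) := by unfold Spec_solution; infer_instance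

-- ===== CLAIM (what is proved, stated in full; the proofs are below) =====
def Claim_equal_solution : Prop := ∀ (m : String) (musicinfos : List String), Dom_solution m musicinfos → Pre_solution m musicinfos → Spec_solution m musicinfos (solution m musicinfos)

-- ===== LEMMAS AND PROOFS =====
def rep (p r : Char) : List Char → List Char
  | [] => []
  | [a] => [a]
  | a :: b :: t => if a = p ∧ b = '#' then r :: rep p r t else a :: rep p r (b :: t)

theorem rep_cons_ne (p r a : Char) (t : List Char) (h : a ≠ p) :
    rep p r (a :: t) = a :: rep p r t := by
  cases t with
  | nil => simp [rep]
  | cons b t2 => simp [rep, h]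

theorem rep_cons_head_ne (p r a : Char) (t : List Char) (h : t.head? ≠ some '#') :
    rep p r (a :: t) = a :: rep p r t := by
  cases t with
  | nil => simp [rep]
  | cons b t2 =>
    simp at h
    simp [rep, h]

theorem rep_match (p r : Char) (t : List Char) : rep p r (p :: '#' :: t) = r :: rep p r t := by
  simp [rep]

theorem rep_head? (p r : Char) (l : List Char) :
    (rep p r l).head? = l.head? ∨ (rep p r l).head? = some r := by
  match l with
  | [] => left; rfl
  | [a] => left; rfl
  | a :: b :: t =>
    by_cases h : a = p ∧ b = '#'
    · right; simp [rep, h]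
    · left; simp [rep, h]

theorem replace_go_eq (p r : Char) : ∀ (fuel : Nat) (l acc : List Char), l.length ≤ fuel →
    PySem.Chars.replace.go [p, '#'] [r] fuel l acc = acc.reverse ++ rep p r l := by
  intro fuel
  induction fuel with
  | zero =>
    intro l acc h
    have : l = [] := by cases l <;> simp_all
    subst this; simp [PySem.Chars.replace.go, rep]
  | succ n ih =>
    intro l acc h
    cases l with
    | nil => simp [PySem.Chars.replace.go, rep]
    | cons c t =>
      by_cases hp : List.isPrefixOf [p, '#'] (c :: t)
      · cases t with
        | nil => simp [List.isPrefixOf] at hp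
        | cons b t2 =>
          simp only [List.isPrefixOf, Bool.and_eq_true, beq_iff_eq] at hp
          obtain ⟨h1, h2, -⟩ := hp
          subst h1; subst h2
          simp only [PySem.Chars.replace.go]
          rw [if_pos (by simp [List.isPrefixOf])]
          rw [ih _ _ (by simp at h ⊢; omega)]
          simp [rep_match]
      · simp only [PySem.Chars.replace.go, hp, Bool.false_eq_true, if_false]
        rw [ih _ _ (by simp at h ⊢; omega)]
        have hc : rep p r (c :: t) = c :: rep p r t := by
          cases t with
          | nil => simp [rep]
          | cons b t2 =>
            simp [List.isPrefixOf] at hp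
            simp only [rep, if_neg (by tauto : ¬ (c = p ∧ b = '#'))]
        simp [hc]

theorem replace_eq_rep (p r : Char) (cs : List Char) :
    PySem.Chars.replace cs [p, '#'] [r] = rep p r cs := by
  simp [PySem.Chars.replace]
  exact replace_go_eq p r cs.length cs [] le_rfl

def fRec : List Char → List Char
  | [] => []
  | [a] => [a]
  | a :: b :: t =>
    if b = '#' then
      (if a ∈ trig then PySem.Chars.lowerChar a :: fRec t else a :: fRec (b :: t))
    else a :: fRec (b :: t)

theorem fRec_hash (t : List Char) : fRec ('#' :: t) = '#' :: fRec t := by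
  cases t with
  | nil => simp [fRec]
  | cons b t2 =>
    by_cases hb : b = '#' <;> simp [fRec, hb, trig]

def comp (cs : List Char) : List Char :=
  rep 'A' 'a' (rep 'G' 'g' (rep 'F' 'f' (rep 'D' 'd' (rep 'C' 'c' cs))))

theorem head_ne_hash_rep (p r : Char) (l : List Char) (hr : r ≠ '#') (h : l.head? ≠ some '#') :
    (rep p r l).head? ≠ some '#' := by
  rcases rep_head? p r l with h1 | h1 <;> rw [h1]
  · exact h
  · simp [hr]

theorem comp_cons (a : Char) (t : List Char) (h : t.head? ≠ some '#') :
    comp (a :: t) = a :: comp t := by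
  unfold comp
  rw [rep_cons_head_ne _ _ _ _ h]
  rw [rep_cons_head_ne _ _ _ _ (head_ne_hash_rep _ _ _ (by decide) h)]
  rw [rep_cons_head_ne _ _ _ _ (head_ne_hash_rep _ _ _ (by decide) (head_ne_hash_rep _ _ _ (by decide) h))]
  rw [rep_cons_head_ne _ _ _ _ (head_ne_hash_rep _ _ _ (by decide) (head_ne_hash_rep _ _ _ (by decide) (head_ne_hash_rep _ _ _ (by decide) h)))]
  rw [rep_cons_head_ne _ _ _ _ (head_ne_hash_rep _ _ _ (by decide) (head_ne_hash_rep _ _ _ (by decide) (head_ne_hash_rep _ _ _ (by decide) (head_ne_hash_rep _ _ _ (by decide) h))))]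

theorem comp_hash (t : List Char) : comp ('#' :: t) = '#' :: comp t := by
  unfold comp
  rw [rep_cons_ne _ _ _ _ (by decide), rep_cons_ne _ _ _ _ (by decide),
    rep_cons_ne _ _ _ _ (by decide), rep_cons_ne _ _ _ _ (by decide),
    rep_cons_ne _ _ _ _ (by decide)]

theorem chain_eq (cs : List Char) : comp cs = fRec cs := by
  induction cs using fRec.induct with
  | case1 => rfl
  | case2 a => rw [comp_cons a [] (by simp)]; rfl
  | case3 a t ha ih =>
    simp only [trig, List.mem_cons, List.not_mem_nil, or_false] at ha
    have hch : PySem.Chars.lowerChar 'C' = 'c' ∧ PySem.Chars.lowerChar 'D' = 'd' ∧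
        PySem.Chars.lowerChar 'F' = 'f' ∧ PySem.Chars.lowerChar 'G' = 'g' ∧
        PySem.Chars.lowerChar 'A' = 'a' := by decide
    have hfin : rep 'A' 'a' (rep 'G' 'g' (rep 'F' 'f' (rep 'D' 'd' (rep 'C' 'c' t)))) = fRec t := ih
    rcases ha with rfl | rfl | rfl | rfl | rfl
    · unfold comp
      rw [rep_match, rep_cons_ne 'D' 'd' 'c' _ (by decide), rep_cons_ne 'F' 'f' 'c' _ (by decide),
        rep_cons_ne 'G' 'g' 'c' _ (by decide), rep_cons_ne 'A' 'a' 'c' _ (by decide), hfin]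
      simp [fRec, trig, hch.1]
    · unfold comp
      rw [rep_cons_ne 'C' 'c' 'D' _ (by decide), rep_cons_ne 'C' 'c' '#' _ (by decide), rep_match,
        rep_cons_ne 'F' 'f' 'd' _ (by decide), rep_cons_ne 'G' 'g' 'd' _ (by decide),
        rep_cons_ne 'A' 'a' 'd' _ (by decide), hfin]
      simp [fRec, trig, hch.2.1]
    · unfold comp
      rw [rep_cons_ne 'C' 'c' 'F' _ (by decide), rep_cons_ne 'C' 'c' '#' _ (by decide),
        rep_cons_ne 'D' 'd' 'F' _ (by decide), rep_cons_ne 'D' 'd' '#' _ (by decide), rep_match,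
        rep_cons_ne 'G' 'g' 'f' _ (by decide), rep_cons_ne 'A' 'a' 'f' _ (by decide), hfin]
      simp [fRec, trig, hch.2.2.1]
    · unfold comp
      rw [rep_cons_ne 'C' 'c' 'G' _ (by decide), rep_cons_ne 'C' 'c' '#' _ (by decide),
        rep_cons_ne 'D' 'd' 'G' _ (by decide), rep_cons_ne 'D' 'd' '#' _ (by decide),
        rep_cons_ne 'F' 'f' 'G' _ (by decide), rep_cons_ne 'F' 'f' '#' _ (by decide), rep_match,
        rep_cons_ne 'A' 'a' 'g' _ (by decide), hfin]
      simp [fRec, trig, hch.2.2.2.1]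
    · unfold comp
      rw [rep_cons_ne 'C' 'c' 'A' _ (by decide), rep_cons_ne 'C' 'c' '#' _ (by decide),
        rep_cons_ne 'D' 'd' 'A' _ (by decide), rep_cons_ne 'D' 'd' '#' _ (by decide),
        rep_cons_ne 'F' 'f' 'A' _ (by decide), rep_cons_ne 'F' 'f' '#' _ (by decide),
        rep_cons_ne 'G' 'g' 'A' _ (by decide), rep_cons_ne 'G' 'g' '#' _ (by decide), rep_match, hfin]
      simp [fRec, trig, hch.2.2.2.2]
  | case4 a t ha ih =>
    have h5 : a ≠ 'C' ∧ a ≠ 'D' ∧ a ≠ 'F' ∧ a ≠ 'G' ∧ a ≠ 'A' := by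
      simp only [trig, List.mem_cons, List.not_mem_nil, or_false, not_or] at ha
      tauto
    unfold comp
    rw [rep_cons_ne 'C' 'c' a _ h5.1, rep_cons_ne 'C' 'c' '#' _ (by decide),
      rep_cons_ne 'D' 'd' a _ h5.2.1, rep_cons_ne 'D' 'd' '#' _ (by decide),
      rep_cons_ne 'F' 'f' a _ h5.2.2.1, rep_cons_ne 'F' 'f' '#' _ (by decide),
      rep_cons_ne 'G' 'g' a _ h5.2.2.2.1, rep_cons_ne 'G' 'g' '#' _ (by decide),
      rep_cons_ne 'A' 'a' a _ h5.2.2.2.2, rep_cons_ne 'A' 'a' '#' _ (by decide)]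
    have hc : ('#' : Char) :: rep 'A' 'a' (rep 'G' 'g' (rep 'F' 'f' (rep 'D' 'd' (rep 'C' 'c' t))))
        = comp ('#' :: t) := (comp_hash t).symm
    rw [hc, ih]
    simp [fRec, ha, fRec_hash]
  | case5 a b t hb ih =>
    rw [comp_cons a (b :: t) (by simp [hb]), ih]
    simp [fRec, hb]

theorem trig_lower (a : Char) (h : a ∈ trig) : PySem.Chars.lowerChar a ∉ trig := by
  fin_cases h <;> decide

def stepf (res : List Char) (ch : Char) : List Char :=
  if ch = '#' then
    match res with
    | p :: t => if p ∈ trig then PySem.Chars.lowerChar p :: t else '#' :: res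
    | [] => '#' :: res
  else ch :: res

theorem step_eval (a : Char) (acc : List Char)
    (h : a = '#' → ∀ q, acc.head? = some q → q ∉ trig) :
    stepf acc a = a :: acc := by
  unfold stepf
  by_cases ha : a = '#'
  · subst ha
    cases acc with
    | nil => rfl
    | cons q t2 => simp [h rfl q rfl]
  · simp [ha]

theorem foldl_change (cs : List Char) : ∀ (acc : List Char),
    (cs.head? = some '#' → ∀ q, acc.head? = some q → q ∉ trig) →
    (cs.foldl stepf acc).reverse = acc.reverse ++ fRec cs := by
  induction cs using fRec.induct with
  | case1 => intro acc _; simp [fRec]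
  | case2 a =>
    intro acc hacc
    rw [List.foldl_cons, step_eval a acc (fun h1 q hq => hacc (by rw [h1]; rfl) q hq)]
    simp [fRec]
  | case3 a t ha ih =>
    intro acc _
    have ha' : a ≠ '#' := by fin_cases ha <;> decide
    rw [List.foldl_cons, List.foldl_cons]
    have h2 : stepf (stepf acc a) '#' = PySem.Chars.lowerChar a :: acc := by
      simp [stepf, ha', ha]
    rw [h2]
    rw [ih _ (fun _ q hq => by
      simp at hq
      rw [← hq]
      exact trig_lower a ha)]
    simp [fRec, ha]
  | case4 a t ha ih =>
    intro acc hacc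
    rw [List.foldl_cons, step_eval a acc (fun h1 q hq => hacc (by rw [h1]; rfl) q hq)]
    rw [ih (a :: acc) (fun _ q hq => by simp at hq; rw [← hq]; exact ha)]
    simp [fRec, ha, fRec_hash]
  | case5 a b t hb ih =>
    intro acc hacc
    rw [List.foldl_cons, step_eval a acc (fun h1 q hq => hacc (by rw [h1]; rfl) q hq)]
    rw [ih (a :: acc) (by simp [hb])]
    simp [fRec, hb]

theorem change_alt_eq (s : String) : change_alt s = change s := by
  have hA : (change s).toList = comp s.toList := by
    simp only [change, PySem.Str.toList_replace]
    show PySem.Chars.replace (PySem.Chars.replace (PySem.Chars.replace (PySem.Chars.replace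
      (PySem.Chars.replace s.toList "C#".toList "c".toList) "D#".toList "d".toList) "F#".toList
      "f".toList) "G#".toList "g".toList) "A#".toList "a".toList = comp s.toList
    rw [show "C#".toList = ['C', '#'] from rfl, show "c".toList = ['c'] from rfl,
      show "D#".toList = ['D', '#'] from rfl, show "d".toList = ['d'] from rfl,
      show "F#".toList = ['F', '#'] from rfl, show "f".toList = ['f'] from rfl,
      show "G#".toList = ['G', '#'] from rfl, show "g".toList = ['g'] from rfl,
      show "A#".toList = ['A', '#'] from rfl, show "a".toList = ['a'] from rfl]
    simp only [replace_eq_rep]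
    rfl
  have hB : (change_alt s).toList = fRec s.toList := by
    have : (change_alt s).toList = ((s.toList.foldl stepf []).reverse : List Char) := by
      simp [change_alt]
      rfl
    rw [this, foldl_change s.toList [] (by simp)]
    simp
  have : (change_alt s).toList = (change s).toList := by rw [hA, hB, chain_eq]
  exact String.ext this

def bstep (h : Option (String × Int)) (x : String × Int) : Option (String × Int) :=
  match h with
  | none => some x
  | some q => if q.2 < x.2 then some x else some q

theorem insertBy_head (x : String × Int) (acc : List (String × Int)) :
    (PySem.List.insertBy (fun a b => decide ((-a.2 : Int) < -b.2)) x acc).head? = bstep acc.head? x := by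
  cases acc with
  | nil => rfl
  | cons q t =>
    simp only [PySem.List.insertBy, bstep]
    by_cases h : q.2 < x.2
    · rw [if_pos (by simp; omega)]
      simp [h]
    · rw [if_neg (by simp; omega)]
      simp [h]

theorem headH (l : List (String × Int)) : ∀ (acc : List (String × Int)),
    (l.foldl (fun acc x => PySem.List.insertBy (fun a b => decide ((-a.2 : Int) < -b.2)) x acc) acc).head?
      = l.foldl bstep acc.head? := by
  induction l with
  | nil => intro acc; rfl
  | cons x t ih =>
    intro acc
    rw [List.foldl_cons, List.foldl_cons, ih, insertBy_head]

theorem bstep_some (l : List (String × Int)) : ∀ (q : String × Int), ∃ p, l.foldl bstep (some q) = some p := by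
  induction l with
  | nil => exact fun q => ⟨q, rfl⟩
  | cons x t ih =>
    intro q
    rw [List.foldl_cons]
    show ∃ p, t.foldl bstep (if q.2 < x.2 then some x else some q) = some p
    by_cases h : q.2 < x.2 <;> simp only [h, if_true, if_false] <;> apply ih

theorem select_eq (ans : List (String × Int)) :
    (if ans.length == 0 then "(None)"
     else ((PySem.List.pyGet? (PySem.List.sorted ans (fun x => -x.2)) 0).map Prod.fst).getD "")
      = (match ans.foldl bstep none with | none => "(None)" | some p => p.1) := by
  cases ans with
  | nil => rfl
  | cons x t =>
    have h1 : (PySem.List.sorted (x :: t) (fun x => -x.2)).head? = (x :: t).foldl bstep none := by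
      rw [PySem.List.sorted_eq_foldl_insertBy, headH]
      rfl
    obtain ⟨p, hp⟩ := bstep_some t x
    have h2 : (x :: t).foldl bstep none = some p := by
      rw [List.foldl_cons]; exact hp
    rw [h2] at h1
    have h3 : PySem.List.pyGet? (PySem.List.sorted (x :: t) (fun x => -x.2)) 0
        = (PySem.List.sorted (x :: t) (fun x => -x.2)).head? := by
      cases hs : PySem.List.sorted (x :: t) (fun x => -x.2) with
      | nil =>
        exact absurd (hs ▸ h1) (by simp)
      | cons y ys => simp [PySem.List.pyGet?, PySem.List.pyIdx?]
    simp only [List.length_cons, h2]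
    rw [if_neg (by simp), h3, h1]
    rfl

theorem collect_vs_best {α P : Type} (c : α → Bool) (e : α → P) (bs : Option P → P → Option P)
    (l : List α) : ∀ (a : List P),
    (l.foldl (fun b t => if c t then bs b (e t) else b) (a.foldl bs none))
      = (l.foldl (fun a t => if c t then a ++ [e t] else a) a).foldl bs none := by
  induction l with
  | nil => intro a; rfl
  | cons x t ih =>
    intro a
    rw [List.foldl_cons, List.foldl_cons]
    by_cases h : c x
    · simp only [h, if_true]
      rw [show bs (a.foldl bs none) (e x) = (a ++ [e x]).foldl bs none by simp, ih]
    · simp only [h, if_false, Bool.false_eq_true]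
      exact ih a

def timeOf (temp : String) : Int :=
  let info := (PySem.Str.split? temp ",").getD []
  let start := (PySem.Str.split? ((PySem.List.pyGet? info 0).getD "") ":").getD []
  let stop := (PySem.Str.split? ((PySem.List.pyGet? info 1).getD "") ":").getD []
  ((PySem.Int.ofStr? ((PySem.List.pyGet? stop 0).getD "")).getD 0
    - (PySem.Int.ofStr? ((PySem.List.pyGet? start 0).getD "")).getD 0) * 60
  + (PySem.Int.ofStr? ((PySem.List.pyGet? stop 1).getD "")).getD 0
  - (PySem.Int.ofStr? ((PySem.List.pyGet? start 1).getD "")).getD 0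

def entryOf (temp : String) : String × Int :=
  (((PySem.List.pyGet? ((PySem.Str.split? temp ",").getD []) 2).getD ""), timeOf temp)

def condOf (m temp : String) : Bool :=
  let info := (PySem.Str.split? temp ",").getD []
  let code0 := change ((PySem.List.pyGet? info 3).getD "")
  let code := pyStrMul code0 (PySem.Int.floordiv (timeOf temp) (PySem.Str.len code0))
               ++ PySem.Str.slice code0 none (some (PySem.Int.mod (timeOf temp) (PySem.Str.len code0)))
  PySem.Str.isIn (change m) code

theorem timeB_eq (temp : String) :
    toMin ((PySem.List.pyGet? ((PySem.Str.split? temp ",").getD []) 1).getD "")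
      - toMin ((PySem.List.pyGet? ((PySem.Str.split? temp ",").getD []) 0).getD "") = timeOf temp := by
  simp only [toMin, timeOf]
  ring

theorem bbody_eq (m temp : String) (b : Option (String × Int)) :
    (let f := (PySem.Str.split? temp ",").getD []
     let time := toMin ((PySem.List.pyGet? f 1).getD "") - toMin ((PySem.List.pyGet? f 0).getD "")
     let mel := change_alt ((PySem.List.pyGet? f 3).getD "")
     let played := pyStrMul mel (PySem.Int.floordiv time (PySem.Str.len mel))
                    ++ PySem.Str.slice mel none (some (PySem.Int.mod time (PySem.Str.len mel)))
     if PySem.Str.isIn (change_alt m) played &&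
         (match b with | none => true | some q => decide (q.2 < time)) then
       some (((PySem.List.pyGet? f 2).getD ""), time)
     else b)
    = if condOf m temp then bstep b (entryOf temp) else b := by
  simp only [change_alt_eq, timeB_eq]
  show (if condOf m temp && _ then _ else b) = _
  by_cases hc : condOf m temp
  · simp only [hc, Bool.true_and, if_true]
    cases b with
    | none => simp [bstep, entryOf]
    | some q =>
      by_cases h : q.2 < timeOf temp
      · simp [h, bstep, entryOf]
      · simp [h, bstep, entryOf]
  · simp [hc]

theorem abody_eq (m temp : String) (a : List (String × Int)) :
    (let info := (PySem.Str.split? temp ",").getD []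
     let start := (PySem.Str.split? ((PySem.List.pyGet? info 0).getD "") ":").getD []
     let stop := (PySem.Str.split? ((PySem.List.pyGet? info 1).getD "") ":").getD []
     let time := ((PySem.Int.ofStr? ((PySem.List.pyGet? stop 0).getD "")).getD 0
                   - (PySem.Int.ofStr? ((PySem.List.pyGet? start 0).getD "")).getD 0) * 60
                 + (PySem.Int.ofStr? ((PySem.List.pyGet? stop 1).getD "")).getD 0
                 - (PySem.Int.ofStr? ((PySem.List.pyGet? start 1).getD "")).getD 0
     let code0 := change ((PySem.List.pyGet? info 3).getD "")
     let code := pyStrMul code0 (PySem.Int.floordiv time (PySem.Str.len code0))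
                  ++ PySem.Str.slice code0 none (some (PySem.Int.mod time (PySem.Str.len code0)))
     if PySem.Str.isIn (change m) code then a ++ [(((PySem.List.pyGet? info 2).getD ""), time)]
     else a)
    = if condOf m temp then a ++ [entryOf temp] else a := rfl

theorem main_eq (m : String) (musicinfos : List String) :
    solution m musicinfos = solution_alt m musicinfos := by
  simp only [solution, solution_alt]
  have hb : (musicinfos.foldl (fun best info =>
      let f := (PySem.Str.split? info ",").getD []
      let time := toMin ((PySem.List.pyGet? f 1).getD "") - toMin ((PySem.List.pyGet? f 0).getD "")
      let mel := change_alt ((PySem.List.pyGet? f 3).getD "")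
      let played := pyStrMul mel (PySem.Int.floordiv time (PySem.Str.len mel))
                     ++ PySem.Str.slice mel none (some (PySem.Int.mod time (PySem.Str.len mel)))
      if PySem.Str.isIn (change_alt m) played &&
          (match best with | none => true | some q => decide (q.2 < time)) then
        some (((PySem.List.pyGet? f 2).getD ""), time)
      else best) (none : Option (String × Int)))
      = musicinfos.foldl (fun b t => if condOf m t then bstep b (entryOf t) else b) none := by
    have hfun : ∀ (b : Option (String × Int)) (t : String), (fun (best : Option (String × Int)) info =>
        let f := (PySem.Str.split? info ",").getD []
        let time := toMin ((PySem.List.pyGet? f 1).getD "") - toMin ((PySem.List.pyGet? f 0).getD "")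
        let mel := change_alt ((PySem.List.pyGet? f 3).getD "")
        let played := pyStrMul mel (PySem.Int.floordiv time (PySem.Str.len mel))
                       ++ PySem.Str.slice mel none (some (PySem.Int.mod time (PySem.Str.len mel)))
        if PySem.Str.isIn (change_alt m) played &&
            (match best with | none => true | some q => decide (q.2 < time)) then
          some (((PySem.List.pyGet? f 2).getD ""), time)
        else best) b t = (fun b t => if condOf m t then bstep b (entryOf t) else b) b t :=
      fun b t => bbody_eq m t b
    exact List.foldl_ext _ _ _ (fun b t _ => hfun b t)
  have ha : (musicinfos.foldl (fun answer temp =>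
      let info := (PySem.Str.split? temp ",").getD []
      let start := (PySem.Str.split? ((PySem.List.pyGet? info 0).getD "") ":").getD []
      let stop := (PySem.Str.split? ((PySem.List.pyGet? info 1).getD "") ":").getD []
      let time := ((PySem.Int.ofStr? ((PySem.List.pyGet? stop 0).getD "")).getD 0
                    - (PySem.Int.ofStr? ((PySem.List.pyGet? start 0).getD "")).getD 0) * 60
                  + (PySem.Int.ofStr? ((PySem.List.pyGet? stop 1).getD "")).getD 0
                  - (PySem.Int.ofStr? ((PySem.List.pyGet? start 1).getD "")).getD 0
      let code0 := change ((PySem.List.pyGet? info 3).getD "")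
      let code := pyStrMul code0 (PySem.Int.floordiv time (PySem.Str.len code0))
                   ++ PySem.Str.slice code0 none (some (PySem.Int.mod time (PySem.Str.len code0)))
      if PySem.Str.isIn (change m) code then answer ++ [(((PySem.List.pyGet? info 2).getD ""), time)]
      else answer) ([] : List (String × Int)))
      = musicinfos.foldl (fun a t => if condOf m t then a ++ [entryOf t] else a) [] :=
    List.foldl_ext _ _ _ (fun a t _ => abody_eq m t a)
  rw [hb, ha]
  rw [show (none : Option (String × Int)) = (([] : List (String × Int)).foldl bstep none) from rfl,
    collect_vs_best (condOf m) entryOf bstep musicinfos []]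
  exact select_eq _
-- ===== VERDICT (by name: the statement is the Claim_ definition above) =====
theorem solution_spec : Claim_equal_solution := by
  intro m musicinfos _ _
  unfold Spec_solution
  exact main_eq m musicinfos
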